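-- pv_equiv track=rewrite | github.com/wikrin/Anime-ICS | selection.py | sel_begin
-- ===== SOURCE A (Python) =====
-- sel = ['ani_one', 'gamer', 'dmhy', 'netflix', 'muse_hk']
--
-- def sel_begin(bgm_data: dict[str, tuple[str, dict]]) -> dict:
--     id_begin: dict = {id: jptv[0] for (id, jptv) in bgm_data.items()}
--     # for id, begin in bgm_data.items():
--     #     for meta in sel:
--     #         if meta in begin[-1]:
--     #             id_begin[id] = begin[-1][meta]
--     #         else:
--     #             continue
--     id_begin.update(
--         {
--             id: begin[-1][meta]
--             for id, begin in bgm_data.items()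
--             for meta in sel
--             if meta in begin[-1]
--         }
--     )
--     return id_begin
-- ===== SOURCE B (Python) =====
-- sel = ['ani_one', 'gamer', 'dmhy', 'netflix', 'muse_hk']
--
-- def sel_begin(bgm_data: dict[str, tuple[str, dict]]) -> dict:
--     # Instead of defaulting and overwriting forward (last match wins), search the
--     # priority list from its HIGH end: scan sel in reverse and take the FIRST meta
--     # present, stopping immediately; fall back to jptv[0] only if none matches.
--     result: dict = {}
--     for id, jptv in bgm_data.items():
--         for meta in reversed(sel):
--             if meta in jptv[-1]:
--                 result[id] = jptv[-1][meta]
--                 break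
--         else:
--             result[id] = jptv[0]
--     return result
-- ===== Notes on version B (the rewrite author's own statement) =====
-- stated objective: simpler
-- what changed: Replaces A's two dict-building passes and last-match-overwrite merging with a single pass that, per id, searches sel from the high-priority end (reversed) and stops at the FIRST matching meta with break, falling back to jptv[0] only when none matches -- a first-match search instead of a fold of overwrites.
import Mathlib
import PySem

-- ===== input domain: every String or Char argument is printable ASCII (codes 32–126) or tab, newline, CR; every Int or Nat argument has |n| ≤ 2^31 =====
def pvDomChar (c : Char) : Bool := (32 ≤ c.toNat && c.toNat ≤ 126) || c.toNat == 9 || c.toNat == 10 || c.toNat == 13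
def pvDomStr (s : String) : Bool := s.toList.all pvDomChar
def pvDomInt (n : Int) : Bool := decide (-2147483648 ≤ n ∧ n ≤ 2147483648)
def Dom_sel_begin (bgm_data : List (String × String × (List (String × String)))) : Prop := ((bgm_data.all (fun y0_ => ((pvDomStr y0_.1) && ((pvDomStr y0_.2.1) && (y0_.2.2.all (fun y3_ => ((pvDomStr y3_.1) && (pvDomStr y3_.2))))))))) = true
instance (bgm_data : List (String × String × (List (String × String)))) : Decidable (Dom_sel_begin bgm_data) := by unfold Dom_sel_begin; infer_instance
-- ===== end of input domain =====

-- B replaces A's two dict passes + update with one pass doing a first-match search of reversed(sel) with break (objective: simpler).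

-- the module constant `sel` (shared by both programs)
def pvSel : List String := ["ani_one", "gamer", "dmhy", "netflix", "muse_hk"]

-- ===== PORT A =====
def sel_begin (bgm_data : List (String × String × (List (String × String)))) : List (String × String) :=
  -- id_begin = {id: jptv[0] for (id, jptv) in bgm_data.items()}
  let id_begin : PySem.Dict String String :=
    bgm_data.foldl (fun d e => d.insert e.1 e.2.1) PySem.Dict.empty
  -- {id: begin[-1][mta] for id, begin in bgm_data.items() for meta in sel if meta in begin[-1]}
  let upd : PySem.Dict String String :=
    bgm_data.foldl (fun d e =>
      pvSel.foldl (fun d' mta =>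
        match (PySem.Dict.mk e.2.2).get? mta with
        | some v => d'.insert e.1 v
        | none => d') d) PySem.Dict.empty
  -- id_begin.update(...); return id_begin
  (id_begin.update upd.items).items

-- ===== PORT B =====
-- for meta in reversed(sel): if meta in jptv[-1]: result[id] = jptv[-1][meta]; break  — else (no break) jptv[0]
def pvFind (ms : List String) (tv : List (String × String)) (jp : String) : String :=
  match ms with
  | [] => jp
  | m :: rest =>
    match (PySem.Dict.mk tv).get? m with
    | some v => v
    | none => pvFind rest tv jp

def sel_begin_alt (bgm_data : List (String × String × (List (String × String)))) : List (String × String) :=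
  (bgm_data.foldl (fun d e => d.insert e.1 (pvFind pvSel.reverse e.2.2 e.2.1))
    (PySem.Dict.empty : PySem.Dict String String)).items

-- ===== PRECONDITION & SPEC =====
-- Pre_ excludes lists with duplicate ids: a Python dict argument cannot carry duplicate keys, so which
-- entry wins in the association-list encoding is an accident of the encoding, not of either program.
def Pre_sel_begin (bgm_data : List (String × String × (List (String × String)))) : Prop :=
  (bgm_data.map (·.1)).Nodup
instance (bgm_data : List (String × String × (List (String × String)))) : Decidable (Pre_sel_begin bgm_data) := by unfold Pre_sel_begin; infer_instance

def pvWitness_sel_begin : (List (String × String × (List (String × String)))) :=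
  [("1", "x", [("gamer", "g"), ("dmhy", "d")]), ("2", "y", []), ("3", "z", [("ani_one", "a")])]

def Spec_sel_begin (bgm_data : List (String × String × (List (String × String)))) (out : List (String × String)) : Prop := out = sel_begin_alt bgm_data
instance (bgm_data : List (String × String × (List (String × String)))) (out : List (String × String)) : Decidable (Spec_sel_begin bgm_data out) := by unfold Spec_sel_begin; infer_instance

-- ===== CLAIM (what is proved, stated in full; the proofs are below) =====
def Claim_equal_sel_begin : Prop := ∀ (bgm_data : List (String × String × (List (String × String)))), Dom_sel_begin bgm_data → Pre_sel_begin bgm_data → Spec_sel_begin bgm_data (sel_begin bgm_data)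

-- ===== LEMMAS AND PROOFS =====

-- A's forward last-match-wins value, as a proof-side helper
def pvEntryVal (jp : String) (tv : List (String × String)) : String :=
  pvSel.foldl (fun v mta =>
    match (PySem.Dict.mk tv).get? mta with
    | some w => w
    | none => v) jp

-- whether some mta of `ms` occurs in the inner dict
def pvHas (ms : List String) (tv : List (String × String)) : Bool :=
  ms.any (fun m => ((PySem.Dict.mk tv).get? m).isSome)

-- the forward overwrite value, generalized over the mta list
def pvValF (ms : List String) (tv : List (String × String)) (v0 : String) : String :=
  ms.foldl (fun v mta =>
    match (PySem.Dict.mk tv).get? mta with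
    | some w => w
    | none => v) v0

theorem pvEntryVal_eq (jp : String) (tv : List (String × String)) :
    pvEntryVal jp tv = pvValF pvSel tv jp := rfl

theorem pvValF_of_not_has (ms : List String) (tv : List (String × String)) (v0 : String)
    (h : pvHas ms tv = false) : pvValF ms tv v0 = v0 := by
  induction ms with
  | nil => rfl
  | cons m ms ih =>
    simp only [pvHas, List.any_cons, Bool.or_eq_false_iff] at h
    cases hm : (PySem.Dict.mk tv).get? m with
    | some w => simp [hm, Option.isSome] at h
    | none =>
      simp only [pvValF, List.foldl_cons, hm]
      exact ih h.2

-- A's inner loop over the metas, characterized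
theorem pvInner_eq (ms : List String) (tv : List (String × String)) (id : String) :
    ∀ (d : PySem.Dict String String) (v0 : String),
      ms.foldl (fun d' mta =>
        match (PySem.Dict.mk tv).get? mta with
        | some v => d'.insert id v
        | none => d') d
      = if pvHas ms tv then d.insert id (pvValF ms tv v0) else d := by
  induction ms with
  | nil => intro d v0; simp [pvHas]
  | cons m ms ih =>
    intro d v0
    cases hm : (PySem.Dict.mk tv).get? m with
    | some w =>
      simp only [List.foldl_cons, hm]
      rw [ih (d.insert id w) w]
      have hhas : pvHas (m :: ms) tv = true := by
        simp [pvHas, hm]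
      have hval : pvValF (m :: ms) tv v0 = pvValF ms tv w := by
        simp [pvValF, hm]
      rw [hhas, hval]
      by_cases h : pvHas ms tv = true
      · simp [h, PySem.Dict.insert_insert_self]
      · simp [h, pvValF_of_not_has ms tv w (by simpa using h)]
    | none =>
      simp only [List.foldl_cons, hm]
      rw [ih d v0]
      have hhas : pvHas (m :: ms) tv = pvHas ms tv := by
        simp [pvHas, hm]
      have hval : pvValF (m :: ms) tv v0 = pvValF ms tv v0 := by
        simp [pvValF, hm]
      rw [hhas, hval]

-- lookup through a foldl of inserts with pairwise-distinct keys
theorem pvGet?_update_nodup (pairs : List (String × String))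
    (h : (pairs.map Prod.fst).Nodup) :
    ∀ (d : PySem.Dict String String) (k : String),
      (pairs.foldl (fun acc p => acc.insert p.1 p.2) d).get? k
      = match (PySem.Dict.mk pairs).get? k with
        | some v => some v
        | none => d.get? k := by
  induction pairs with
  | nil => intro d k; simp [PySem.Dict.get?]
  | cons p ps ih =>
    intro d k
    simp only [List.map_cons, List.nodup_cons] at h
    simp only [List.foldl_cons]
    rw [ih h.2 (d.insert p.1 p.2) k]
    rw [show (PySem.Dict.mk (p :: ps)).get? k
          = if p.1 == k then some p.2 else (PySem.Dict.mk ps).get? k from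
        by cases p; exact PySem.Dict.get?_mk_cons _ _ _ _]
    by_cases hk : p.1 = k
    · subst hk
      have hnone : (PySem.Dict.mk ps).get? p.1 = none := by
        rw [PySem.Dict.get?_eq_none_iff_not_mem_keys]
        simpa [PySem.Dict.keys_mk] using h.1
      simp [hnone, PySem.Dict.get?_insert_self]
    · rw [if_neg (by simpa using hk),
        PySem.Dict.get?_insert_of_ne d p.2 (Ne.symm hk)]

-- keys already present: updating adds no keys
theorem pvSet_update_of_subset (s : PySem.Set String) :
    ∀ (xs : List String), (∀ x ∈ xs, x ∈ s) → PySem.Set.update s xs = s := by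
  intro xs
  induction xs generalizing s with
  | nil => intro _; rfl
  | cons x xs ih =>
    intro hsub
    have hx : PySem.Set.add s x = s := by
      have hc : PySem.Set.contains s x = true := (PySem.Set.contains_iff s x).mpr (hsub x (by simp))
      simp [PySem.Set.add, hsub x (by simp)]
    show PySem.Set.update (PySem.Set.add s x) xs = s
    rw [hx]
    exact ih s (fun y hy => hsub y (by simp [hy]))

-- abbreviation for the common per-entry result pair
def pvG (e : String × String × (List (String × String))) : String × String :=
  (e.1, pvEntryVal e.2.1 e.2.2)

-- reversed-first-match search equals the forward overwrite fold
theorem pvFind_eq_valF (ms : List String) (tv : List (String × String)) (jp : String) :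
    pvFind ms tv jp = pvValF ms.reverse tv jp := by
  induction ms with
  | nil => rfl
  | cons m rest ih =>
    rw [List.reverse_cons]
    show (match (PySem.Dict.mk tv).get? m with
          | some v => v
          | none => pvFind rest tv jp) = pvValF (rest.reverse ++ [m]) tv jp
    rw [show pvValF (rest.reverse ++ [m]) tv jp
          = (match (PySem.Dict.mk tv).get? m with
             | some w => w
             | none => pvValF rest.reverse tv jp) from by
      simp [pvValF, List.foldl_append]]
    cases (PySem.Dict.mk tv).get? m with
    | some v => rfl
    | none => exact ih

theorem pvFind_eq_entryVal (tv : List (String × String)) (jp : String) :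
    pvFind pvSel.reverse tv jp = pvEntryVal jp tv := by
  rw [pvFind_eq_valF, List.reverse_reverse, pvEntryVal_eq]

-- B's port, in closed form
theorem pvAlt_eq (l : List (String × String × (List (String × String))))
    (hnd : (l.map (·.1)).Nodup) : sel_begin_alt l = l.map pvG := by
  unfold sel_begin_alt
  rw [PySem.Dict.items_foldl_insert_fresh l (·.1) (fun e => pvFind pvSel.reverse e.2.2 e.2.1)
      PySem.Dict.empty (fun a _ => PySem.Dict.contains_empty _) hnd]
  simp only [PySem.Dict.empty, List.nil_append]
  exact List.map_congr_left (fun e _ => by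
    show (e.1, pvFind pvSel.reverse e.2.2 e.2.1) = pvG e
    rw [pvFind_eq_entryVal]; rfl)

-- A's port, in the same closed form
theorem pvA_eq (l : List (String × String × (List (String × String))))
    (hnd : (l.map (·.1)).Nodup) : sel_begin l = l.map pvG := by
  unfold sel_begin
  -- rewrite the inner mta loop into its characterization
  have hstep : (fun (d : PySem.Dict String String) (e : String × String × (List (String × String))) =>
      pvSel.foldl (fun d' mta =>
        match (PySem.Dict.mk e.2.2).get? mta with
        | some v => d'.insert e.1 v
        | none => d') d)
      = (fun d e => if pvHas pvSel e.2.2 then d.insert e.1 (pvEntryVal e.2.1 e.2.2) else d) := by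
    funext d e
    rw [pvInner_eq pvSel e.2.2 e.1 d e.2.1, pvEntryVal_eq]
  rw [hstep]
  -- the guarded fold is the fold over the filtered list
  rw [show (l.foldl (fun d e => if pvHas pvSel e.2.2 then d.insert e.1 (pvEntryVal e.2.1 e.2.2) else d)
        PySem.Dict.empty)
      = ((l.filter (fun e => pvHas pvSel e.2.2)).foldl
          (fun d e => d.insert e.1 (pvEntryVal e.2.1 e.2.2)) PySem.Dict.empty) from
    (List.foldl_filter).symm]
  set Lf := l.filter (fun e => pvHas pvSel e.2.2) with hLf
  have hLfsub : ∀ e ∈ Lf, e ∈ l := fun e he => List.mem_of_mem_filter he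
  have hndLf : (Lf.map (·.1)).Nodup := by
    rw [hLf]
    exact hnd.sublist (List.Sublist.map _ List.filter_sublist)
  -- items of the two intermediate dicts
  have hbase := PySem.Dict.items_foldl_insert_fresh l (·.1) (fun e => e.2.1)
      PySem.Dict.empty (fun a _ => PySem.Dict.contains_empty _) hnd
  have hupd := PySem.Dict.items_foldl_insert_fresh Lf (·.1) (fun e => pvEntryVal e.2.1 e.2.2)
      PySem.Dict.empty (fun a _ => PySem.Dict.contains_empty _) hndLf
  set base := l.foldl (fun (d : PySem.Dict String String) e => d.insert e.1 e.2.1) PySem.Dict.empty with hbasedef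
  set upd := Lf.foldl (fun (d : PySem.Dict String String) e => d.insert e.1 (pvEntryVal e.2.1 e.2.2)) PySem.Dict.empty with hupddef
  simp only [PySem.Dict.empty, List.nil_append] at hbase hupd
  -- base's keys are exactly l's ids
  have hbasekeys : base.keys = l.map (·.1) := by
    show base.items.map Prod.fst = l.map (·.1)
    rw [hbase, List.map_map]; rfl
  -- base lookups
  have hbaseget : ∀ e ∈ l, base.get? e.1 = some e.2.1 := by
    intro e he
    refine PySem.Dict.get?_of_mem_items base ?_ ?_
    · rw [hbase]; exact List.mem_map_of_mem he
    · show base.keys.Nodup; rw [hbasekeys]; exact hnd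
  -- the final dict
  set fin := base.update upd.items with hfindef
  have hfinget : ∀ e ∈ l, fin.get? e.1 = some (pvEntryVal e.2.1 e.2.2) := by
    intro e he
    have hupdnd : ((upd.items).map Prod.fst).Nodup := by
      rw [hupd, List.map_map]; exact hndLf
    rw [hfindef, PySem.Dict.update, pvGet?_update_nodup upd.items hupdnd base e.1]
    by_cases hh : pvHas pvSel e.2.2 = true
    · have hmem : (e.1, pvEntryVal e.2.1 e.2.2) ∈ upd.items := by
        rw [hupd]
        exact List.mem_map_of_mem (by rw [hLf]; exact List.mem_filter.mpr ⟨he, hh⟩)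
      have : (PySem.Dict.mk upd.items).get? e.1 = some (pvEntryVal e.2.1 e.2.2) := by
        refine PySem.Dict.get?_of_mem_items _ hmem ?_
        show ((upd.items).map Prod.fst).Nodup
        exact hupdnd
      rw [this]
    · have hnotkey : (PySem.Dict.mk upd.items).get? e.1 = none := by
        rw [PySem.Dict.get?_eq_none_iff_not_mem_keys]
        show e.1 ∉ (upd.items).map Prod.fst
        rw [hupd, List.map_map]
        intro hmem
        obtain ⟨e', he'Lf, he'1⟩ := List.mem_map.mp hmem
        have he'l : e' ∈ l := hLfsub e' he'Lf
        have : e' = e := List.inj_on_of_nodup_map hnd he'l he he'1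
        subst this
        have := (List.mem_filter.mp (by rw [← hLf]; exact he'Lf)).2
        exact hh this
      rw [hnotkey, hbaseget e he,
        pvEntryVal_eq, pvValF_of_not_has pvSel e.2.2 e.2.1 (by simpa using hh)]
  -- final keys = l's ids
  have hfinkeys : fin.keys = l.map (·.1) := by
    rw [hfindef, PySem.Dict.update,
      PySem.Dict.keys_foldl_insert_key upd.items Prod.fst (fun _ p => p.2) base,
      hbasekeys]
    apply pvSet_update_of_subset
    intro x hx
    rw [hupd, List.map_map] at hx
    obtain ⟨e', he'Lf, he'1⟩ := List.mem_map.mp hx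
    exact he'1 ▸ List.mem_map_of_mem (hLfsub e' he'Lf)
  have hfinnd : fin.keys.Nodup := by rw [hfinkeys]; exact hnd
  -- assemble
  show fin.items = l.map pvG
  rw [PySem.Dict.items_eq_map_keys fin hfinnd ""]
  rw [hfinkeys, List.map_map]
  refine List.map_congr_left ?_
  intro e he
  show (e.1, fin.getD e.1 "") = pvG e
  rw [PySem.Dict.getD_of_get?_eq_some fin "" (hfinget e he)]
  rfl

-- ===== VERDICT (by name: the statement is the Claim_ definition above) =====
theorem sel_begin_spec : Claim_equal_sel_begin := by
  intro bgm_data _ hpre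
  unfold Spec_sel_begin
  rw [pvA_eq bgm_data hpre, pvAlt_eq bgm_data hpre]
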